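-- pv_equiv track=rewrite | github.com/kotontin/PracticalWorks | mod_10_task_8.py | task_10_8_2
-- ===== SOURCE A (Python) =====
-- def task_10_8_2(levels: int) -> list[str]:
--     lines = []
--
--     for level in range(1, levels + 1):
--         row = ''
--         for row_number in range(levels, levels - level, -1):
--             row += str(row_number)
--
--         ratio = 2
--         points = '.' * ratio * (levels - level)
--         reverse_row = row[::-1]
--         lines.append(f"{row}{points}{reverse_row}")
--
--     return lines
-- ===== SOURCE B (Python) =====
-- def task_10_8_2(levels: int) -> list[str]:
--     lines = []
--     row = ''
--     for level in range(1, levels + 1):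
--         row += str(levels - level + 1)
--         points = '.' * 2 * (levels - level)
--         lines.append(f"{row}{points}{row[::-1]}")
--     return lines
-- ===== Notes on version B (the rewrite author's own statement) =====
-- stated objective: simpler
-- what changed: The inner countdown loop that rebuilds the row prefix at every level is removed: a single row accumulator carried across the outer loop appends str(levels-level+1) once per level.
import Mathlib
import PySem

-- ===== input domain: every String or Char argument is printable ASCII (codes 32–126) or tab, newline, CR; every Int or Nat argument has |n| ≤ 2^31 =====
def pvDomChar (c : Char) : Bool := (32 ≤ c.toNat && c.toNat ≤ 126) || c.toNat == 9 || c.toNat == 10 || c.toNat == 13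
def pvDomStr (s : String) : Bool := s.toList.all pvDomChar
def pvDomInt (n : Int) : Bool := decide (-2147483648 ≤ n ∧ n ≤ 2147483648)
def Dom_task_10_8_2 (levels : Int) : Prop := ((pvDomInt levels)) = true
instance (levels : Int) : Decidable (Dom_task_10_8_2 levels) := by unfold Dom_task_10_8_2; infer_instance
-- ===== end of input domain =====

-- B replaces A's inner loop that rebuilds the row prefix at every level by a row accumulator
-- carried across the single outer loop (objective: simpler, one accumulating pass instead of nested passes).

-- ===== PORT A =====
-- A rebuilds `row` from scratch with an inner countdown loop at every level.
def task_10_8_2 (levels : Int) : List String :=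
  (PySem.List.pyRange 1 (levels + 1) 1).foldl
    (fun lines level =>
      let row := (PySem.List.pyRange levels (levels - level) (-1)).foldl
          (fun r n => r ++ PySem.Int.toChars n) ([] : List Char)
      let points := List.replicate ((2 * (levels - level)).toNat) '.'
      let reverse_row := row.reverse   -- row[::-1]
      lines ++ [String.ofList (row ++ points ++ reverse_row)])
    []

-- ===== PORT B =====
-- B carries (lines, row) through the one outer loop, appending one digit-string per level.
def task_10_8_2_alt (levels : Int) : List String :=
  ((PySem.List.pyRange 1 (levels + 1) 1).foldl
    (fun (st : List String × List Char) level =>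
      let row := st.2 ++ PySem.Int.toChars (levels - level + 1)
      let points := List.replicate ((2 * (levels - level)).toNat) '.'
      (st.1 ++ [String.ofList (row ++ points ++ row.reverse)], row))
    ([], [])).1

-- ===== PRECONDITION & SPEC =====
def Spec_task_10_8_2 (levels : Int) (out : List String) : Prop := out = task_10_8_2_alt levels
instance (levels : Int) (out : List String) : Decidable (Spec_task_10_8_2 levels out) := by unfold Spec_task_10_8_2; infer_instance

-- ===== CLAIM (what is proved, stated in full; the proofs are below) =====
def Claim_equal_task_10_8_2 : Prop := ∀ (levels : Int), Dom_task_10_8_2 levels → Spec_task_10_8_2 levels (task_10_8_2 levels)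

-- ===== LEMMAS AND PROOFS =====

/-- The row A's inner loop builds for level `l` (with `l = m+1`), as a fold over a mapped range. -/
def pvRow (n : Int) (m : Nat) : List Char :=
  ((List.range m).map (fun (k : Nat) => n - (k : Int))).foldl (fun r i => r ++ PySem.Int.toChars i) []

theorem pvRow_succ (n : Int) (m : Nat) :
    pvRow n (m + 1) = pvRow n m ++ PySem.Int.toChars (n - m) := by
  simp [pvRow, List.range_succ]

/-- A's inner fold at level `l ≥ 0` is `pvRow levels l.toNat`. -/
theorem inner_eq_pvRow (n l : Int) (hl : 0 ≤ l) :
    (PySem.List.pyRange n (n - l) (-1)).foldl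
        (fun r i => r ++ PySem.Int.toChars i) ([] : List Char) = pvRow n l.toNat := by
  rw [PySem.List.pyRange_neg_one]
  have : (n - (n - l)).toNat = l.toNat := by omega
  rw [this]; unfold pvRow; rfl

/-- Main invariant: over the first `m` levels, B's fold returns A's lines and `row = pvRow levels m`. -/
theorem loop_invariant (n : Int) (m : Nat) :
    (PySem.List.pyRange 1 ((m : Int) + 1) 1).foldl
      (fun (st : List String × List Char) level =>
        let row := st.2 ++ PySem.Int.toChars (n - level + 1)
        let points := List.replicate ((2 * (n - level)).toNat) '.'
        (st.1 ++ [String.ofList (row ++ points ++ row.reverse)], row))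
      ([], [])
    =
    ((PySem.List.pyRange 1 ((m : Int) + 1) 1).foldl
      (fun lines level =>
        let row := (PySem.List.pyRange n (n - level) (-1)).foldl
            (fun r i => r ++ PySem.Int.toChars i) ([] : List Char)
        let points := List.replicate ((2 * (n - level)).toNat) '.'
        let reverse_row := row.reverse
        lines ++ [String.ofList (row ++ points ++ reverse_row)])
      [], pvRow n m) := by
  induction m with
  | zero => simp [PySem.List.pyRange_one_eq_nil, pvRow]
  | succ m ih =>
    have hsplit : PySem.List.pyRange 1 ((↑(m + 1) : Int) + 1) 1
        = PySem.List.pyRange 1 ((m : Int) + 1) 1 ++ [(m : Int) + 1] := by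
      push_cast
      exact PySem.List.pyRange_one_succ_right (by omega)
    rw [hsplit, List.foldl_append, List.foldl_append, ih]
    have hrow : (PySem.List.pyRange n (n - ((m : Int) + 1)) (-1)).foldl
        (fun r i => r ++ PySem.Int.toChars i) ([] : List Char) = pvRow n (m + 1) := by
      have := inner_eq_pvRow n ((m : Int) + 1) (by omega)
      have ht : ((m : Int) + 1).toNat = m + 1 := by omega
      rw [ht] at this; exact this
    simp only [List.foldl_cons, List.foldl_nil, hrow, pvRow_succ]
    have harg : n - ((m : Int) + 1) + 1 = n - (m : Int) := by omega
    rw [harg]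

-- ===== VERDICT (by name: the statement is the Claim_ definition above) =====
theorem task_10_8_2_spec : Claim_equal_task_10_8_2 := by
  intro levels _
  unfold Spec_task_10_8_2 task_10_8_2 task_10_8_2_alt
  by_cases h : 0 ≤ levels
  · have hm : levels + 1 = ((levels.toNat : Int)) + 1 := by omega
    rw [hm, loop_invariant levels levels.toNat]
  · rw [PySem.List.pyRange_one_eq_nil (by omega : levels + 1 ≤ 1)]
    rfl
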